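-- pv_equiv track=rewrite | github.com/gipder/asr_correction | my_utils.py | get_max_seq_length
-- ===== SOURCE A (Python) =====
-- from typing import List, Dict, Tuple, Any
--
-- def get_max_seq_length(data: List[Dict]) -> Tuple[int, int, int]:
--     # find out the minimum max_seq_length
--     override_max_seq_length = None
--     lengths = [len(d['input_ids']) for d in data]
--     max_seq_length = max(lengths)
--     longest_seq_ix = lengths.index(max_seq_length)
--     # return Tuple
--     return (
--         override_max_seq_length if isinstance(override_max_seq_length, int) else max_seq_length,
--         max_seq_length,
--         longest_seq_ix,
--     )
-- ===== SOURCE B (Python) =====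
-- from typing import List, Dict, Tuple
--
-- def get_max_seq_length(data: List[Dict]) -> Tuple[int, int, int]:
--     # single pass: maintain the best length and the index of its FIRST occurrence
--     if not data:
--         raise ValueError("max() arg is an empty sequence")
--     best_len = -1
--     best_ix = 0
--     for ix, d in enumerate(data):
--         n = len(d['input_ids'])
--         if n > best_len:
--             best_len, best_ix = n, ix
--     return (best_len, best_len, best_ix)
-- ===== Notes on version B (the rewrite author's own statement) =====
-- stated objective: simpler
-- what changed: Replaces the three passes (length comprehension, max(), list.index()) by one loop that maintains the best length and the index of its first occurrence.
import Mathlib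
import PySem

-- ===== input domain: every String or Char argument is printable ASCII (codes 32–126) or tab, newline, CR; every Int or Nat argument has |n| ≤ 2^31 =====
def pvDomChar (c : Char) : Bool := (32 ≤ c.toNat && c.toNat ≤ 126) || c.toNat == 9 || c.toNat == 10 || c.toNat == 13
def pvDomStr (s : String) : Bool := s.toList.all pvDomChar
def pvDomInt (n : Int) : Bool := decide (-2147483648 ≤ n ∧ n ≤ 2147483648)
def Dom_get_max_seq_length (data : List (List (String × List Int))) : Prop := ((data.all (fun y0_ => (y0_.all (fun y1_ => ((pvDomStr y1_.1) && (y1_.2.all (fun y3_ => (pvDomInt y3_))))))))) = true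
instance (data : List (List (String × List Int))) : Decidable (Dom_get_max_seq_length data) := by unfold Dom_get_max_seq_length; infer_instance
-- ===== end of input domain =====

-- B fuses A's three passes (comprehension, max, index) into one loop keeping the best length and first index; return value only.
-- ===== PORT A =====
def get_max_seq_length (data : List (List (String × List Int))) : Int × Int × Int :=
  let lengths : List Int := data.map (fun d => ((PySem.Dict.getD (PySem.Dict.ofList d) "input_ids" ([] : List Int)).length : Int))
  let max_seq_length : Int := (PySem.List.max? lengths (fun y => y)).getD 0
  let longest_seq_ix : Int := (((PySem.List.index? lengths max_seq_length).getD 0 : Nat) : Int)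
  (max_seq_length, max_seq_length, longest_seq_ix)

-- ===== PORT B =====
def pvAltGo (data : List (List (String × List Int))) (ix bl bi : Int) : Int × Int :=
  match data with
  | [] => (bl, bi)
  | d :: rest =>
    let n : Int := ((PySem.Dict.getD (PySem.Dict.ofList d) "input_ids" ([] : List Int)).length : Int)
    if bl < n then pvAltGo rest (ix + 1) n ix else pvAltGo rest (ix + 1) bl bi

def get_max_seq_length_alt (data : List (List (String × List Int))) : Int × Int × Int :=
  let r := pvAltGo data 0 (-1) 0
  (r.1, r.1, r.2)

-- ===== PRECONDITION & SPEC =====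
-- Pre_ excludes exactly the inputs where A raises: empty data (ValueError from max) and a dict missing 'input_ids' (KeyError).
def Pre_get_max_seq_length (data : List (List (String × List Int))) : Prop :=
  data ≠ [] ∧ (data.all (fun d => PySem.Dict.contains (PySem.Dict.ofList d) "input_ids")) = true
instance (data : List (List (String × List Int))) : Decidable (Pre_get_max_seq_length data) := by unfold Pre_get_max_seq_length; infer_instance
def pvWitness_get_max_seq_length : (List (List (String × List Int))) := [[("input_ids", [1, 2])], [("input_ids", [1, 2, 3])]]
def Spec_get_max_seq_length (data : List (List (String × List Int))) (out : Int × Int × Int) : Prop := out = get_max_seq_length_alt data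
instance (data : List (List (String × List Int))) (out : Int × Int × Int) : Decidable (Spec_get_max_seq_length data out) := by unfold Spec_get_max_seq_length; infer_instance

-- ===== CLAIM (what is proved, stated in full; the proofs are below) =====
def Claim_equal_get_max_seq_length : Prop := ∀ (data : List (List (String × List Int))), Dom_get_max_seq_length data → Pre_get_max_seq_length data → Spec_get_max_seq_length data (get_max_seq_length data)

-- ===== LEMMAS AND PROOFS =====

-- first index of a present element: idxOf? agrees with idxOf
theorem pv_idxOf?_of_mem (M : Int) (l : List Int) (h : M ∈ l) :
    l.idxOf? M = some (l.idxOf M) := by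
  induction l with
  | nil => cases h
  | cons a t ih =>
    by_cases hM : a = M
    · subst hM; simp [List.idxOf?, List.idxOf, List.findIdx?_cons, List.findIdx_cons]
    · have hm : M ∈ t := by cases h with | head => exact absurd rfl hM | tail _ h => exact h
      simp only [List.idxOf?, List.idxOf, List.findIdx?_cons, List.findIdx_cons, beq_iff_eq, hM,
        if_false, Bool.cond_eq_ite]
      simp only [List.idxOf?, List.idxOf] at ih
      rw [ih hm]
      rfl

-- pure-integer version of B's loop, over the list of lengths
def pvG (ls : List Int) (ix bl bi : Int) : Int × Int :=
  match ls with
  | [] => (bl, bi)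
  | a :: t => if bl < a then pvG t (ix + 1) a ix else pvG t (ix + 1) bl bi

theorem pvAltGo_eq_pvG (data : List (List (String × List Int))) (ix bl bi : Int) :
    pvAltGo data ix bl bi =
      pvG (data.map (fun d => ((PySem.Dict.getD (PySem.Dict.ofList d) "input_ids" ([] : List Int)).length : Int))) ix bl bi := by
  induction data generalizing ix bl bi with
  | nil => rfl
  | cons d rest ih => simp only [pvAltGo, pvG, List.map_cons]; split <;> exact ih _ _ _

theorem pvG_spec (ls : List Int) (ix bl bi : Int) :
    pvG ls ix bl bi =
      if bl < ls.foldl max bl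
      then (ls.foldl max bl, ix + ((ls.idxOf (ls.foldl max bl) : Nat) : Int))
      else (bl, bi) := by
  induction ls generalizing ix bl bi with
  | nil => simp [pvG]
  | cons a t ih =>
    have hle : ∀ (b : Int) (l : List Int), b ≤ l.foldl max b := by
      intro b l
      induction l generalizing b with
      | nil => exact le_refl b
      | cons x l ihl => exact le_trans (le_max_left b x) (ihl (max b x))
    simp only [pvG, List.foldl_cons]
    by_cases hba : bl < a
    · rw [if_pos hba, ih, max_eq_right (le_of_lt hba)]
      have haM : a ≤ t.foldl max a := hle a t
      rw [if_pos (lt_of_lt_of_le hba haM)]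
      by_cases haM' : a < t.foldl max a
      · rw [if_pos haM']
        rw [List.idxOf_cons_ne _ (ne_of_lt haM')]
        rw [Prod.mk.injEq]
        exact ⟨rfl, by push_cast; ring⟩
      · have hMa : t.foldl max a = a := le_antisymm (not_lt.mp haM') haM
        rw [if_neg haM', hMa, List.idxOf_cons_self]
        simp
    · rw [if_neg hba, ih, max_eq_left (not_lt.mp hba)]
      by_cases hM : bl < t.foldl max bl
      · rw [if_pos hM, if_pos hM]
        rw [List.idxOf_cons_ne _ (by omega : a ≠ t.foldl max bl)]
        rw [Prod.mk.injEq]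
        exact ⟨rfl, by push_cast; ring⟩
      · rw [if_neg hM, if_neg hM]

-- ===== VERDICT (by name: the statement is the Claim_ definition above) =====
theorem get_max_seq_length_spec : Claim_equal_get_max_seq_length := by
  intro data _ hpre
  obtain ⟨hne, _⟩ := hpre
  unfold Spec_get_max_seq_length get_max_seq_length get_max_seq_length_alt
  obtain ⟨d, rest, rfl⟩ := List.exists_cons_of_ne_nil hne
  rw [pvAltGo_eq_pvG]
  simp only [List.map_cons]
  set fd : Int := ((PySem.Dict.getD (PySem.Dict.ofList d) "input_ids" ([] : List Int)).length : Int) with hfd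
  set L : List Int := rest.map (fun d => ((PySem.Dict.getD (PySem.Dict.ofList d) "input_ids" ([] : List Int)).length : Int)) with hL
  have hfd0 : (0 : Int) ≤ fd := Int.natCast_nonneg _
  have hle : ∀ (b : Int) (l : List Int), b ≤ l.foldl max b := by
    intro b l
    induction l generalizing b with
    | nil => exact le_refl b
    | cons x l ihl => exact le_trans (le_max_left b x) (ihl (max b x))
  rw [pvG_spec]
  simp only [List.foldl_cons]
  have hm1 : max (-1 : Int) fd = fd := max_eq_right (by omega)
  rw [hm1]
  have hMpos : (-1 : Int) < L.foldl max fd := lt_of_lt_of_le (by omega) (le_trans hfd0 (hle fd L))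
  rw [if_pos hMpos]
  set M : Int := L.foldl max fd with hM
  have hmax? : PySem.List.max? (fd :: L) (fun y => y) = some M := by
    rw [hM]; exact PySem.List.max?_id_cons fd L
  rw [hmax?]
  simp only [Option.getD_some]
  have hmem : M ∈ fd :: L := PySem.List.max?_mem hmax?
  have hidx : PySem.List.index? (fd :: L) M = some ((fd :: L).idxOf M) := by
    rw [PySem.List.index?_eq_idxOf?]
    exact pv_idxOf?_of_mem _ _ hmem
  rw [hidx]
  simp
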